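-- pv_equiv track=rewrite | github.com/yuxin101/skills | skills/trumphuang/cls-openclaw-insights/scripts/get_dashboard_queries.py | format_grouped
-- ===== SOURCE A (Python) =====
-- from typing import Dict, Any, List, Optional
--
-- def format_grouped(queries: List[Dict[str, str]]) -> str:
--     """按类型分组输出"""
--     if not queries:
--         return "未找到查询信息"
--
--     # 按类型分组
--     log_queries = [q for q in queries if q["type"] == "log"]
--     metric_queries = [q for q in queries if q["type"] == "metric"]
--     unknown_queries = [q for q in queries if q["type"] == "unknown"]
--
--     lines = []
--
--     if log_queries:
--         lines.append("=" * 60)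
--         lines.append("📋 日志查询 (CQL/SQL)")
--         lines.append("=" * 60)
--         for q in log_queries:
--             lines.append(f"\n【{q['title']}】")
--             lines.append(f"  {q['query']}")
--
--     if metric_queries:
--         lines.append("\n" + "=" * 60)
--         lines.append("📊 指标查询 (PromQL)")
--         lines.append("=" * 60)
--         for q in metric_queries:
--             lines.append(f"\n【{q['title']}】")
--             lines.append(f"  {q['query']}")
--
--     if unknown_queries:
--         lines.append("\n" + "=" * 60)
--         lines.append("❓ 未知类型")
--         lines.append("=" * 60)
--         for q in unknown_queries:
--             lines.append(f"\n【{q['title']}】")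
--             lines.append(f"  {q['query']}")
--
--     # 统计信息
--     lines.append("\n" + "-" * 60)
--     lines.append(f"统计: 日志查询 {len(log_queries)} 个, 指标查询 {len(metric_queries)} 个, 未知 {len(unknown_queries)} 个")
--
--     return "\n".join(lines)
-- ===== SOURCE B (Python) =====
-- def format_grouped(queries):
--     """按类型分组输出"""
--     if not queries:
--         return "未找到查询信息"
--     RANK = {"log": 0, "metric": 1, "unknown": 2}
--     HEAD = [("", "📋 日志查询 (CQL/SQL)"), ("\n", "📊 指标查询 (PromQL)"), ("\n", "❓ 未知类型")]
--     # stable sort by type rank, then one scan emitting a header at each rank boundary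
--     tagged = sorted([q for q in queries if q["type"] in RANK], key=lambda q: RANK[q["type"]])
--     counts = [0, 0, 0]
--     lines = []
--     prev = -1
--     for q in tagged:
--         r = RANK[q["type"]]
--         if r != prev:
--             prefix, header = HEAD[r]
--             lines.append(prefix + "=" * 60)
--             lines.append(header)
--             lines.append("=" * 60)
--             prev = r
--         counts[r] += 1
--         lines.append(f"\n【{q['title']}】")
--         lines.append(f"  {q['query']}")
--     lines.append("\n" + "-" * 60)
--     lines.append(f"统计: 日志查询 {counts[0]} 个, 指标查询 {counts[1]} 个, 未知 {counts[2]} 个")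
--     return "\n".join(lines)
-- ===== Notes on version B (the rewrite author's own statement) =====
-- stated objective: alternative
-- what changed: B stably sorts the valid queries by a numeric type rank and renders the report in one boundary-detecting scan (header emitted whenever the rank changes, counters bumped per element), instead of A's three separate filter passes and three copy-pasted section blocks.
import Mathlib
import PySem

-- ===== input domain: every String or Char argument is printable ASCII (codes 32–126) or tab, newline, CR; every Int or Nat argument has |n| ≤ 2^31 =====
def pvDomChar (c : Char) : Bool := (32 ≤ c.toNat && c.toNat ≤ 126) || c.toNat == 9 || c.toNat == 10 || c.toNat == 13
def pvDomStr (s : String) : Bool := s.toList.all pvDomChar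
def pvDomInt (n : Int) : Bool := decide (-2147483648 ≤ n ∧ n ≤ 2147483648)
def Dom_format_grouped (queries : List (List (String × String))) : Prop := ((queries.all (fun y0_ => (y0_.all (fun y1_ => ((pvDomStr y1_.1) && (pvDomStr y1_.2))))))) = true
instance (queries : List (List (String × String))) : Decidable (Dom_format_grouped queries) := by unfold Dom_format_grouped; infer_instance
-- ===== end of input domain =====

-- B replaces A's three filter passes and three copy-pasted section blocks by a stable sort
-- on a numeric type rank followed by ONE scan that emits a header at every rank boundary
-- and bumps per-type counters; the return value is proved equal ('alternative', not faster).

-- q[k] for the dict q (Pre_ guarantees the key is present where the Python reads it)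
def pvQGet (q : List (String × String)) (k : String) : String :=
  ((PySem.Dict.ofList q).get? k).getD ""

-- the two lines appended per query (identical f-strings in both Pythons)
def pvEntry (q : List (String × String)) : List String :=
  ["\n【" ++ pvQGet q "title" ++ "】", "  " ++ pvQGet q "query"]

def pvEq60 : String := String.ofList (List.replicate 60 '=')
def pvDash60 : String := String.ofList (List.replicate 60 '-')

def pvStats (nl nm nu : Nat) : String :=
  "统计: 日志查询 " ++ PySem.Int.toStr nl ++ " 个, 指标查询 " ++ PySem.Int.toStr nm
    ++ " 个, 未知 " ++ PySem.Int.toStr nu ++ " 个"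

-- ===== PORT A =====
def format_grouped (queries : List (List (String × String))) : String :=
  if queries = [] then "未找到查询信息"
  else
    let log_queries := queries.filter (fun q => pvQGet q "type" == "log")
    let metric_queries := queries.filter (fun q => pvQGet q "type" == "metric")
    let unknown_queries := queries.filter (fun q => pvQGet q "type" == "unknown")
    let lines : List String :=
      (if log_queries.isEmpty then [] else
        [pvEq60, "📋 日志查询 (CQL/SQL)", pvEq60]
          ++ log_queries.foldl (fun acc q => acc ++ pvEntry q) [])
      ++ (if metric_queries.isEmpty then [] else
        ["\n" ++ pvEq60, "📊 指标查询 (PromQL)", pvEq60]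
          ++ metric_queries.foldl (fun acc q => acc ++ pvEntry q) [])
      ++ (if unknown_queries.isEmpty then [] else
        ["\n" ++ pvEq60, "❓ 未知类型", pvEq60]
          ++ unknown_queries.foldl (fun acc q => acc ++ pvEntry q) [])
      ++ ["\n" ++ pvDash60,
          pvStats log_queries.length metric_queries.length unknown_queries.length]
    PySem.Str.join "\n" lines

-- ===== PORT B =====
-- RANK[t] of Source B (the 3-entry dict as a match; 3 plays the role of 'not in RANK')
def pvRankOf (t : String) : Nat :=
  if t == "log" then 0 else if t == "metric" then 1 else if t == "unknown" then 2 else 3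

-- HEAD[r] of Source B: (prefix, header) per rank
def pvHead : Nat → String × String
  | 0 => ("", "📋 日志查询 (CQL/SQL)")
  | 1 => ("\n", "📊 指标查询 (PromQL)")
  | _ => ("\n", "❓ 未知类型")

-- counts[r] += 1
def pvBump (c : Nat × Nat × Nat) : Nat → Nat × Nat × Nat
  | 0 => (c.1 + 1, c.2.1, c.2.2)
  | 1 => (c.1, c.2.1 + 1, c.2.2)
  | _ => (c.1, c.2.1, c.2.2 + 1)

-- one loop iteration of Source B's scan: state = (lines, counts, prev)
def pvScanStep (st : List String × (Nat × Nat × Nat) × Int) (q : List (String × String)) :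
    List String × (Nat × Nat × Nat) × Int :=
  let r := pvRankOf (pvQGet q "type")
  let st1 := if (r : Int) ≠ st.2.2
    then (st.1 ++ [(pvHead r).1 ++ pvEq60, (pvHead r).2, pvEq60], st.2.1, (r : Int))
    else st
  (st1.1 ++ pvEntry q, pvBump st1.2.1 r, st1.2.2)

def format_grouped_alt (queries : List (List (String × String))) : String :=
  if queries = [] then "未找到查询信息"
  else
    let tagged := PySem.List.sorted
      (queries.filter (fun q => pvRankOf (pvQGet q "type") ≠ 3))
      (fun q => pvRankOf (pvQGet q "type"))
    let st := tagged.foldl pvScanStep ([], (0, 0, 0), -1)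
    let lines := st.1 ++ ["\n" ++ pvDash60, pvStats st.2.1.1 st.2.1.2.1 st.2.1.2.2]
    PySem.Str.join "\n" lines

-- ===== PRECONDITION & SPEC =====
-- Pre_ excludes exactly the inputs on which Python A raises KeyError: a query dict without a
-- "type" key, or a query of type log/metric/unknown missing "title" or "query".
def Pre_format_grouped (queries : List (List (String × String))) : Prop :=
  (queries.all (fun q =>
    match (PySem.Dict.ofList q).get? "type" with
    | none => false
    | some t =>
        !(t == "log" || t == "metric" || t == "unknown")
        || (((PySem.Dict.ofList q).get? "title").isSome
            && ((PySem.Dict.ofList q).get? "query").isSome))) = true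
instance (queries : List (List (String × String))) : Decidable (Pre_format_grouped queries) := by unfold Pre_format_grouped; infer_instance

def pvWitness_format_grouped : (List (List (String × String))) :=
  [[("type", "log"), ("title", "t1"), ("query", "q1")],
   [("type", "other")],
   [("type", "metric"), ("title", "t2"), ("query", "q2")]]

def Spec_format_grouped (queries : List (List (String × String))) (out : String) : Prop := out = format_grouped_alt queries
instance (queries : List (List (String × String))) (out : String) : Decidable (Spec_format_grouped queries out) := by unfold Spec_format_grouped; infer_instance

-- ===== CLAIM (what is proved, stated in full; the proofs are below) =====
def Claim_equal_format_grouped : Prop := ∀ (queries : List (List (String × String))), Dom_format_grouped queries → Pre_format_grouped queries → Spec_format_grouped queries (format_grouped queries)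

-- ===== LEMMAS AND PROOFS =====

-- abbreviation used only by the proofs
def pvRank (q : List (String × String)) : Nat := pvRankOf (pvQGet q "type")

-- pvRankOf takes only the values 0,1,2,3
theorem pvRank_cases (q : List (String × String)) :
    pvRank q = 0 ∨ pvRank q = 1 ∨ pvRank q = 2 ∨ pvRank q = 3 := by
  unfold pvRank pvRankOf; split_ifs <;> simp

-- stable insertion into a rank-segmented list lands at the end of its own segment
theorem insert_seg (key : List (String × String) → Nat) (x : List (String × String))
    (a b : List (List (String × String)))
    (ha : ∀ y ∈ a, key y ≤ key x) (hb : ∀ y ∈ b, key x < key y) :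
    PySem.List.insertBy (fun u v => decide (key u < key v)) x (a ++ b) = a ++ x :: b := by
  induction a with
  | nil =>
    cases b with
    | nil => simp [PySem.List.insertBy]
    | cons y ys =>
      have := hb y (by simp)
      simp [PySem.List.insertBy, this]
  | cons z a' ih =>
    have hz : ¬ key x < key z := by
      have := ha z (by simp); omega
    have hstep : PySem.List.insertBy (fun u v => decide (key u < key v)) x (z :: (a' ++ b))
        = z :: PySem.List.insertBy (fun u v => decide (key u < key v)) x (a' ++ b) := by
      simp [PySem.List.insertBy, hz]
    simp only [List.cons_append, hstep]
    rw [ih (fun y hy => ha y (by simp [hy]))]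

-- counts[r] += 1 iterated n times
def pvBumpN (c : Nat × Nat × Nat) (r n : Nat) : Nat × Nat × Nat :=
  match r with
  | 0 => (c.1 + n, c.2.1, c.2.2)
  | 1 => (c.1, c.2.1 + n, c.2.2)
  | _ => (c.1, c.2.1, c.2.2 + n)

theorem pvBumpN_zero (c : Nat × Nat × Nat) (r : Nat) : pvBumpN c r 0 = c := by
  unfold pvBumpN; match r with
  | 0 => rfl
  | 1 => rfl
  | _ + 2 => rfl

theorem pvBump_bumpN (c : Nat × Nat × Nat) (r n : Nat) :
    pvBumpN (pvBump c r) r n = pvBumpN c r (n + 1) := by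
  unfold pvBumpN pvBump; match r with
  | 0 => simp; omega
  | 1 => simp; omega
  | _ + 2 => simp; omega

-- the insertion-sort fold keeps a rank-segmented accumulator segmented, appending
-- each element to the end of its rank's segment
theorem foldl_insert_seg (xs a0 a1 a2 : List (List (String × String)))
    (hxs : ∀ x ∈ xs, pvRank x ≤ 2)
    (h0 : ∀ y ∈ a0, pvRank y = 0) (h1 : ∀ y ∈ a1, pvRank y = 1) (h2 : ∀ y ∈ a2, pvRank y = 2) :
    xs.foldl (fun acc x => PySem.List.insertBy (fun u v => decide (pvRank u < pvRank v)) x acc)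
      (a0 ++ a1 ++ a2)
    = (a0 ++ xs.filter (fun q => pvRank q == 0))
      ++ (a1 ++ xs.filter (fun q => pvRank q == 1))
      ++ (a2 ++ xs.filter (fun q => pvRank q == 2)) := by
  induction xs generalizing a0 a1 a2 with
  | nil => simp
  | cons x xs ih =>
    have hx := hxs x (by simp)
    have hxs' : ∀ y ∈ xs, pvRank y ≤ 2 := fun y hy => hxs y (by simp [hy])
    simp only [List.foldl_cons, List.filter_cons]
    rcases pvRank_cases x with h | h | h | h
    · have : PySem.List.insertBy (fun u v => decide (pvRank u < pvRank v)) x (a0 ++ (a1 ++ a2))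
          = a0 ++ x :: (a1 ++ a2) := by
        apply insert_seg
        · intro y hy; rw [h0 y hy, h]
        · intro y hy; rw [h]
          rcases List.mem_append.mp hy with hy | hy
          · rw [h1 y hy]; omega
          · rw [h2 y hy]; omega
      rw [List.append_assoc, this]
      have := ih (a0 ++ [x]) a1 a2 hxs'
        (fun y hy => by rcases List.mem_append.mp hy with hy | hy
                        · exact h0 y hy
                        · simp at hy; subst hy; exact h) h1 h2
      simp only [List.append_assoc] at this ⊢
      rw [show a0 ++ x :: (a1 ++ a2) = a0 ++ ([x] ++ (a1 ++ a2)) from by simp, this]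
      simp [h]
    · have : PySem.List.insertBy (fun u v => decide (pvRank u < pvRank v)) x ((a0 ++ a1) ++ a2)
          = (a0 ++ a1) ++ x :: a2 := by
        apply insert_seg
        · intro y hy; rw [h]
          rcases List.mem_append.mp hy with hy | hy
          · rw [h0 y hy]; omega
          · rw [h1 y hy]
        · intro y hy; rw [h, h2 y hy]; omega
      rw [this]
      have := ih a0 (a1 ++ [x]) a2 hxs' h0
        (fun y hy => by rcases List.mem_append.mp hy with hy | hy
                        · exact h1 y hy
                        · simp at hy; subst hy; exact h) h2
      rw [show (a0 ++ a1) ++ x :: a2 = a0 ++ (a1 ++ [x]) ++ a2 by simp] at *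
      rw [this]
      simp [h]
    · have : PySem.List.insertBy (fun u v => decide (pvRank u < pvRank v)) x ((a0 ++ a1 ++ a2) ++ [])
          = (a0 ++ a1 ++ a2) ++ x :: [] := by
        apply insert_seg
        · intro y hy; rw [h]
          rcases List.mem_append.mp hy with hy | hy
          · rcases List.mem_append.mp hy with hy | hy
            · rw [h0 y hy]; omega
            · rw [h1 y hy]; omega
          · rw [h2 y hy]
        · intro y hy; simp at hy
      simp only [List.append_nil] at this
      rw [this]
      have := ih a0 a1 (a2 ++ [x]) hxs' h0 h1
        (fun y hy => by rcases List.mem_append.mp hy with hy | hy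
                        · exact h2 y hy
                        · simp at hy; subst hy; exact h)
      rw [show a0 ++ a1 ++ a2 ++ [x] = a0 ++ (a1 ++ (a2 ++ [x])) by simp] at *
      simp only [List.append_assoc] at this ⊢
      rw [this]
      simp [h]
    · -- impossible: hx : pvRank x ≤ 2, h : pvRank x = 3
      omega

-- the stable sort of the valid queries is exactly the three rank segments in order
theorem sorted_seg (xs : List (List (String × String))) (hxs : ∀ x ∈ xs, pvRank x ≤ 2) :
    PySem.List.sorted xs pvRank
    = xs.filter (fun q => pvRank q == 0)
      ++ xs.filter (fun q => pvRank q == 1)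
      ++ xs.filter (fun q => pvRank q == 2) := by
  rw [PySem.List.sorted_eq_foldl_insertBy]
  have := foldl_insert_seg xs [] [] [] hxs (by simp) (by simp) (by simp)
  simpa using this

-- scan over a run of constant rank with prev already = r: entries only
theorem scan_run (r : Nat) (seg : List (List (String × String)))
    (hseg : ∀ q ∈ seg, pvRank q = r) (lines : List String) (c : Nat × Nat × Nat) :
    seg.foldl pvScanStep (lines, c, (r : Int))
    = (lines ++ seg.flatMap pvEntry, pvBumpN c r seg.length, (r : Int)) := by
  induction seg generalizing lines c with
  | nil => simp [pvBumpN_zero]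
  | cons q seg ih =>
    have hq : pvRank q = r := hseg q (by simp)
    simp only [List.foldl_cons]
    rw [show pvScanStep (lines, c, (r : Int)) q = (lines ++ pvEntry q, pvBump c r, (r : Int)) by
      simp [pvScanStep, pvRank] at hq ⊢; rw [hq]; simp]
    rw [ih (fun y hy => hseg y (by simp [hy]))]
    simp [pvBump_bumpN]

-- scan over one whole rank segment, starting with prev < r: header then entries
theorem scan_seg (r : Nat) (seg : List (List (String × String)))
    (hseg : ∀ q ∈ seg, pvRank q = r) (lines : List String) (c : Nat × Nat × Nat)
    (prev : Int) (hprev : prev < (r : Int)) :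
    seg.foldl pvScanStep (lines, c, prev)
    = (lines
        ++ (if seg.isEmpty then [] else
              [(pvHead r).1 ++ pvEq60, (pvHead r).2, pvEq60] ++ seg.flatMap pvEntry),
       pvBumpN c r seg.length,
       if seg.isEmpty then prev else (r : Int)) := by
  cases seg with
  | nil => simp [pvBumpN_zero]
  | cons q seg =>
    have hq : pvRank q = r := hseg q (by simp)
    simp only [List.foldl_cons]
    rw [show pvScanStep (lines, c, prev) q
        = (lines ++ [(pvHead r).1 ++ pvEq60, (pvHead r).2, pvEq60] ++ pvEntry q,
           pvBump c r, (r : Int)) by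
      simp only [pvScanStep, pvRank] at hq ⊢
      rw [hq, if_pos (by omega)]]
    rw [scan_run r seg (fun y hy => hseg y (by simp [hy]))]
    simp [pvBump_bumpN]

-- sections of the two ports coincide: the filters seen through pvRank
theorem filter_rank_eq (queries : List (List (String × String))) (r : Nat) (t : String)
    (hr3 : r ≠ 3) (ht : ∀ s, pvRankOf s = r ↔ s = t) :
    (queries.filter (fun q => pvRankOf (pvQGet q "type") ≠ 3)).filter
        (fun q => pvRank q == r)
    = queries.filter (fun q => pvQGet q "type" == t) := by
  rw [List.filter_filter]
  apply List.filter_congr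
  intro q _
  by_cases h : pvQGet q "type" = t
  · have h1 : (pvRankOf t == r) = true := by simpa using (ht t).mpr rfl
    have h3 : ¬ pvRankOf t = 3 := by rw [(ht t).mpr rfl]; exact hr3
    simp [pvRank, h, h1, h3]
  · have hrk : pvRankOf (pvQGet q "type") ≠ r := fun hc => h ((ht _).mp hc)
    have h1 : (pvRankOf (pvQGet q "type") == r) = false := by simpa using hrk
    have h2 : (pvQGet q "type" == t) = false := by simpa using h
    simp [pvRank, h1, h2]

theorem rank0_iff (s : String) : pvRankOf s = 0 ↔ s = "log" := by
  unfold pvRankOf; split_ifs with h1 h2 h3 <;> simp_all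
theorem rank1_iff (s : String) : pvRankOf s = 1 ↔ s = "metric" := by
  unfold pvRankOf; split_ifs with h1 h2 h3 <;> simp_all
theorem rank2_iff (s : String) : pvRankOf s = 2 ↔ s = "unknown" := by
  unfold pvRankOf; split_ifs with h1 h2 h3 <;> simp_all

theorem format_grouped_eq (queries : List (List (String × String))) :
    format_grouped queries = format_grouped_alt queries := by
  unfold format_grouped format_grouped_alt
  by_cases hq : queries = []
  · simp [hq]
  simp only [hq, if_false]
  set valid := queries.filter (fun q => pvRankOf (pvQGet q "type") ≠ 3) with hvalid
  have hle : ∀ x ∈ valid, pvRank x ≤ 2 := by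
    intro x hx
    have := List.of_mem_filter hx
    simp only [decide_not, Bool.not_eq_true', decide_eq_false_iff_not] at this
    rcases pvRank_cases x with h | h | h | h <;> simp [pvRank] at h ⊢ <;> omega
  rw [show (fun q : List (String × String) => pvRankOf (pvQGet q "type")) = pvRank from rfl,
     sorted_seg valid hle]
  set l0 := valid.filter (fun q => pvRank q == 0) with hl0
  set l1 := valid.filter (fun q => pvRank q == 1) with hl1
  set l2 := valid.filter (fun q => pvRank q == 2) with hl2
  have hr0 : ∀ q ∈ l0, pvRank q = 0 := fun q hq => by
    have := List.of_mem_filter hq; simpa using this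
  have hr1 : ∀ q ∈ l1, pvRank q = 1 := fun q hq => by
    have := List.of_mem_filter hq; simpa using this
  have hr2 : ∀ q ∈ l2, pvRank q = 2 := fun q hq => by
    have := List.of_mem_filter hq; simpa using this
  rw [List.foldl_append, List.foldl_append]
  rw [scan_seg 0 l0 hr0 _ _ (-1) (by norm_num)]
  -- after segment 0: prev is -1 or 0, both < 1
  rw [scan_seg 1 l1 hr1 _ _ _ (by split_ifs <;> norm_num)]
  rw [scan_seg 2 l2 hr2 _ _ _ (by split_ifs <;> norm_num)]
  have hf0 : l0 = queries.filter (fun q => pvQGet q "type" == "log") := by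
    rw [hl0, hvalid]; exact filter_rank_eq queries 0 "log" (by omega) rank0_iff
  have hf1 : l1 = queries.filter (fun q => pvQGet q "type" == "metric") := by
    rw [hl1, hvalid]; exact filter_rank_eq queries 1 "metric" (by omega) rank1_iff
  have hf2 : l2 = queries.filter (fun q => pvQGet q "type" == "unknown") := by
    rw [hl2, hvalid]; exact filter_rank_eq queries 2 "unknown" (by omega) rank2_iff
  rw [PySem.List.foldl_append_eq_flatMap, PySem.List.foldl_append_eq_flatMap,
      PySem.List.foldl_append_eq_flatMap]
  simp only [← hf0, ← hf1, ← hf2, List.nil_append]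
  simp only [pvBumpN, pvHead]
  split_ifs <;> simp [List.append_assoc]

-- ===== VERDICT (by name: the statement is the Claim_ definition above) =====
theorem format_grouped_spec : Claim_equal_format_grouped := by
  intro queries _ _
  unfold Spec_format_grouped
  exact format_grouped_eq queries
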